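-- pv_equiv track=rewrite | github.com/chaeryeon823/Coding-Test | PYTHON/PROGRAMMERS/138476.py | solution
-- ===== SOURCE A (Python) =====
-- from collections import Counter
--
-- def solution(k, tangerine):
--     answer = 0
--     cnt = sorted(Counter(tangerine).values(), reverse=True)
--     tmp = 0
--     for c in cnt:
--         if tmp < k:
--             tmp += c
--             answer += 1
--         else:
--             break
--
--     return answer
-- ===== SOURCE B (Python) =====
-- from collections import Counter
--
-- def solution(k, tangerine):
--     counts = Counter(tangerine)
--     bucket = Counter(counts.values())
--     maxc = max(bucket, default=0)
--     total = 0
--     answer = 0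
--     for c in range(maxc, 0, -1):
--         for _ in range(bucket.get(c, 0)):
--             if total >= k:
--                 return answer
--             total += c
--             answer += 1
--     return answer
-- ===== Notes on version B (the rewrite author's own statement) =====
-- stated objective: alternative
-- what changed: Replaces A's comparison sort of the Counter values with a counting-sort-style pass: a histogram of count values (Counter of counts) scanned from the largest count down to 1, consuming bucket entries until k tangerines are gathered.
import Mathlib
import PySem

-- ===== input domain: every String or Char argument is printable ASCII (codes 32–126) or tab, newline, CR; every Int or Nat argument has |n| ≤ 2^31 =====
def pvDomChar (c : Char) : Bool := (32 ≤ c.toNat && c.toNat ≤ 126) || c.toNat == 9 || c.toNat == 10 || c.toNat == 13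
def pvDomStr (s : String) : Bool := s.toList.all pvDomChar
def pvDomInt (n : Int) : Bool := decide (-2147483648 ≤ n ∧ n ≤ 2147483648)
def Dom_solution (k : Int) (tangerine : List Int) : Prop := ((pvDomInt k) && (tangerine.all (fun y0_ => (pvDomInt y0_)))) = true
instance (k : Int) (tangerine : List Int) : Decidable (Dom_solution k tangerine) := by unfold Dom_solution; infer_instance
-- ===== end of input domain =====

-- B replaces A's comparison sort of the counts with a counting-sort-style descending scan
-- over a histogram of count values (objective: alternative algorithm, no sort).

-- ===== PORT A =====
-- the 'for c in cnt: if tmp < k: … else: break' loop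
def solLoopA (k : Int) : List Int → Int → Int → Int
  | [], _, answer => answer
  | c :: rest, tmp, answer =>
    if tmp < k then solLoopA k rest (tmp + c) (answer + 1) else answer

def solution (k : Int) (tangerine : List Int) : Int :=
  solLoopA k (PySem.List.sorted (PySem.Dict.counter tangerine).values (fun x => x) true) 0 0

-- ===== PORT B =====
-- inner 'for _ in range(bucket.get(c, 0))' loop; 'some answer' models the early 'return answer'
def innerB (k c : Int) : Nat → Int → Int → Option Int × Int × Int
  | 0, total, answer => (none, total, answer)
  | n+1, total, answer =>
    if total ≥ k then (some answer, total, answer)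
    else innerB k c n (total + c) (answer + 1)

-- outer 'for c in range(maxc, 0, -1)' loop
def outerB (k : Int) (bucket : PySem.Dict Int Int) : List Int → Int → Int → Int
  | [], _, answer => answer
  | c :: rest, total, answer =>
    match innerB k c (bucket.getD c 0).toNat total answer with
    | (some r, _, _) => r
    | (none, total', answer') => outerB k bucket rest total' answer'

def solution_alt (k : Int) (tangerine : List Int) : Int :=
  let counts := PySem.Dict.counter tangerine
  let bucket := PySem.Dict.counter counts.values
  let maxc := PySem.List.maxD bucket.keys (fun x => x) 0
  outerB k bucket (PySem.List.pyRange maxc 0 (-1)) 0 0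

-- ===== PRECONDITION & SPEC =====
def Spec_solution (k : Int) (tangerine : List Int) (out : Int) : Prop := out = solution_alt k tangerine
instance (k : Int) (tangerine : List Int) (out : Int) : Decidable (Spec_solution k tangerine out) := by unfold Spec_solution; infer_instance

-- ===== CLAIM (what is proved, stated in full; the proofs are below) =====
def Claim_equal_solution : Prop := ∀ (k : Int) (tangerine : List Int), Dom_solution k tangerine → Spec_solution k tangerine (solution k tangerine)

-- ===== LEMMAS AND PROOFS =====

-- the inner loop with its continuation equals A's loop on a replicate-block prefix
theorem innerB_cont (k c : Int) (n : Nat) :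
    ∀ (rest : List Int) (total answer : Int),
    (match innerB k c n total answer with
     | (some r, _, _) => r
     | (none, t, a) => solLoopA k rest t a)
    = solLoopA k (List.replicate n c ++ rest) total answer := by
  induction n with
  | zero => intro rest total answer; simp [innerB]
  | succ m ih =>
    intro rest total answer
    by_cases h : total ≥ k
    · have h' : ¬ total < k := by omega
      simp [innerB, h, List.replicate_succ, solLoopA, h']
    · have h' : total < k := by omega
      simp only [innerB, if_neg h, List.replicate_succ, List.cons_append, solLoopA, if_pos h']
      exact ih rest (total + c) (answer + 1)

-- the whole double loop equals A's loop on the flattened block list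
theorem outerB_flat (k : Int) (bucket : PySem.Dict Int Int) :
    ∀ (cs : List Int) (total answer : Int),
    outerB k bucket cs total answer
    = solLoopA k (cs.flatMap (fun c => List.replicate (bucket.getD c 0).toNat c)) total answer := by
  intro cs
  induction cs with
  | nil => intro total answer; simp [outerB, solLoopA]
  | cons c rest ih =>
    intro total answer
    rw [List.flatMap_cons, ← innerB_cont k c (bucket.getD c 0).toNat]
    unfold outerB
    rcases h : innerB k c (bucket.getD c 0).toNat total answer with ⟨o, t, a⟩
    cases o with
    | none => simp [ih]
    | some r => simp

-- flattening replicate blocks along a strictly decreasing list is nonincreasing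
theorem flat_pairwise_ge (f : Int → Nat) :
    ∀ (cs : List Int), cs.Pairwise (· > ·) →
    (cs.flatMap (fun c => List.replicate (f c) c)).Pairwise (· ≥ ·) := by
  intro cs
  induction cs with
  | nil => intro _; simp
  | cons c rest ih =>
    intro h
    rw [List.pairwise_cons] at h
    rw [List.flatMap_cons, List.pairwise_append]
    refine ⟨List.pairwise_replicate.2 (Or.inr le_rfl), ih h.2, ?_⟩
    intro x hx y hy
    rw [List.eq_of_mem_replicate hx]
    rcases List.mem_flatMap.1 hy with ⟨c', hc', hy'⟩
    rw [List.eq_of_mem_replicate hy']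
    exact le_of_lt (h.1 c' hc')

-- count of any element in the flattened block list over a nodup index list
theorem count_flat (vs : List Int) :
    ∀ (cs : List Int), cs.Nodup → ∀ (a : Int),
    (cs.flatMap (fun c => List.replicate (vs.count c) c)).count a
    = if a ∈ cs then vs.count a else 0 := by
  intro cs
  induction cs with
  | nil => intro _ a; simp
  | cons c rest ih =>
    intro hnd a
    rw [List.nodup_cons] at hnd
    rw [List.flatMap_cons, List.count_append, List.count_replicate, ih hnd.2 a]
    by_cases hac : a = c
    · subst hac
      simp [hnd.1]
    · simp [hac, Ne.symm hac]

-- the flattened block list over the descending count range is a permutation of vs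
theorem flat_perm (vs : List Int) (m : Int) (hb : ∀ v ∈ vs, 1 ≤ v ∧ v ≤ m) :
    ((PySem.List.pyRange m 0 (-1)).flatMap (fun c => List.replicate (vs.count c) c)).Perm vs := by
  have hnd : (PySem.List.pyRange m 0 (-1)).Nodup := by
    rw [PySem.List.pyRange_neg_one_eq_reverse]
    exact (List.nodup_reverse).2 (PySem.List.nodup_pyRange_one _ _)
  rw [List.perm_iff_count]
  intro a
  rw [count_flat vs _ hnd a]
  by_cases hm : a ∈ PySem.List.pyRange m 0 (-1)
  · simp [hm]
  · rw [if_neg hm]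
    rw [PySem.List.mem_pyRange_neg_one] at hm
    symm
    rw [List.count_eq_zero]
    intro hav
    have h1 := hb a hav
    exact hm ⟨by omega, h1.2⟩

-- every value of a Counter is at least 1
theorem counter_values_pos (xs : List Int) :
    ∀ v ∈ (PySem.Dict.counter xs).values, 1 ≤ v := by
  intro v hv
  rw [PySem.Dict.values_eq_map_keys _ (PySem.Dict.nodup_keys_counter xs) 0] at hv
  rcases List.mem_map.1 hv with ⟨kk, hk, rfl⟩
  rw [PySem.Dict.keys_counter, PySem.Set.mem_ofList] at hk
  rw [PySem.Dict.getD_counter]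
  have : 0 < xs.count kk := List.count_pos_iff.2 hk
  exact_mod_cast this

-- every value is bounded by the maximum bucket key
theorem counter_values_le_max (vs : List Int) :
    ∀ v ∈ vs, v ≤ PySem.List.maxD (PySem.Set.ofList vs) (fun x => x) 0 := by
  intro v hv
  have hmem : v ∈ PySem.Set.ofList vs := (PySem.Set.mem_ofList vs v).2 hv
  rcases h : PySem.List.max? (PySem.Set.ofList vs) (fun x => x) with _ | m
  · rw [PySem.List.max?_eq_none_iff] at h
    simp [h] at hmem
  · have := PySem.List.max?_isMax h v hmem
    simp only [PySem.List.maxD, h, Option.getD_some]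
    exact this

-- the flattened block list IS the reverse-sorted value list
theorem flat_eq_sorted (vs : List Int) (hpos : ∀ v ∈ vs, 1 ≤ v) :
    ((PySem.List.pyRange (PySem.List.maxD (PySem.Set.ofList vs) (fun x => x) 0) 0 (-1)).flatMap
        (fun c => List.replicate (vs.count c) c))
    = PySem.List.sorted vs (fun x => x) true := by
  set m := PySem.List.maxD (PySem.Set.ofList vs) (fun x => x) 0 with hm
  have hb : ∀ v ∈ vs, 1 ≤ v ∧ v ≤ m :=
    fun v hv => ⟨hpos v hv, counter_values_le_max vs v hv⟩
  have hdec : (PySem.List.pyRange m 0 (-1)).Pairwise (· > ·) := by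
    rw [PySem.List.pyRange_neg_one_eq_reverse, List.pairwise_reverse]
    exact (PySem.List.pairwise_lt_pyRange_one _ _).imp (fun h => h)
  refine PySem.List.eq_of_perm_of_pairwise_le_of_injective (fun x : Int => -x) neg_injective
    ((flat_perm vs m hb).trans (PySem.List.sorted_perm vs (fun x => x) true).symm) ?_ ?_
  · exact (flat_pairwise_ge (fun c => vs.count c) _ hdec).imp (fun h => by simpa using h)
  · exact (PySem.List.sorted_pairwise_rev vs (fun x => x)).imp (fun h => by simpa using h)

-- ===== VERDICT (by name: the statement is the Claim_ definition above) =====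
theorem solution_spec : Claim_equal_solution := by
  intro k tangerine _
  unfold Spec_solution solution solution_alt
  rw [outerB_flat]
  simp only [PySem.Dict.getD_counter, Int.toNat_natCast, PySem.Dict.keys_counter]
  rw [flat_eq_sorted _ (counter_values_pos tangerine)]
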